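-- pv_equiv track=rewrite | github.com/Hmbown/FluxEM | fluxem/domains/music/atonal.py | prime_form
-- ===== SOURCE A (Python) =====
-- from typing import Any, List, Tuple
--
-- def normal_form(pcs: List[int]) -> List[int]:
--     """
--     Compute normal form of a pitch class set.
--
--     Normal form = most compact left-packed rotation.
--
--     EXACT algorithm from Forte (1973).
--     """
--     if not pcs:
--         return []
--
--     # Generate all rotations
--     rotations = []
--     sorted_pcs = sorted(set(pc % 12 for pc in pcs))
--
--     for i in range(12):
--         rotated = [((pc - i) % 12) for pc in sorted_pcs]
--         rotations.append(rotated)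
--
--     # Find most compact (minimizes span between first and last)
--     def span(rotation):
--         if len(rotation) == 1:
--             return 0
--         return (rotation[-1] - rotation[0]) % 12
--
--     min_span = min(span(r) for r in rotations)
--     candidates = [r for r in rotations if span(r) == min_span]
--
--     # Choose leftmost (lexicographically smallest)
--     return min(candidates)
--
-- def prime_form(pcs: List[int]) -> List[int]:
--     """
--     Compute prime form (most compact form + its inverse).
--
--     Prime form = normal form or its inverse, whichever is most compact.
--
--     EXACT matrix operation!
--     """
--     nf = normal_form(pcs)
--
--     # Inversion (11 - n for each n)
--     inv = sorted([((11 - pc) % 12) for pc in pcs])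
--     inv_nf = normal_form(inv)
--
--     # Compare spans
--     def span(rotation):
--         if len(rotation) == 1:
--             return 0
--         return (rotation[-1] - rotation[0]) % 12
--
--     if span(nf) <= span(inv_nf):
--         return nf
--     else:
--         return inv_nf
-- ===== SOURCE B (Python) =====
-- def prime_form(pcs):
--     if not pcs:
--         return []
--     s = sorted({pc % 12 for pc in pcs})
--     nf = [p - s[0] for p in s]
--     t = sorted({(11 - pc) % 12 for pc in pcs})
--     inv_nf = [p - t[0] for p in t]
--     return nf if nf[-1] <= inv_nf[-1] else inv_nf
-- ===== Notes on version B (the rewrite author's own statement) =====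
-- stated objective: simpler
-- what changed: Replaces the 12-rotation generation, span-minimisation and lexicographic candidate search by a closed-form transposition (every rotation has the same span, so the normal form is just the sorted pitch-class set shifted to start at 0), and compares the two normal forms by their last element.
import Mathlib
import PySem

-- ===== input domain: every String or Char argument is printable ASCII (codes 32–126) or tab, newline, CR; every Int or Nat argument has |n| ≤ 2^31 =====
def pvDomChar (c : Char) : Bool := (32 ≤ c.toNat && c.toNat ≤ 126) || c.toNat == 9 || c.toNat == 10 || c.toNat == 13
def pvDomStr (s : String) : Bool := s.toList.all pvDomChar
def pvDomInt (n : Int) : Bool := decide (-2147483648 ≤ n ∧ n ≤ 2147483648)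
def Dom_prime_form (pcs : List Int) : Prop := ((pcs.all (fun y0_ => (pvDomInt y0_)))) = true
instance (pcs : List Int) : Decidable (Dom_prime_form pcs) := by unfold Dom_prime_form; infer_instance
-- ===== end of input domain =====

-- B replaces A's 12-rotation/span-minimisation/lexicographic search by a closed-form
-- transposition of the sorted pitch-class set (objective: simpler).

-- ===== PORT A =====
-- Python's local helper 'span' (defined identically in normal_form and prime_form)
def pySpan (rotation : List Int) : Int :=
  if rotation.length == 1 then 0
  else PySem.Int.mod (PySem.List.pyGetD rotation (-1) 0 - PySem.List.pyGetD rotation 0 0) 12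

def normal_form (pcs : List Int) : List Int :=
  if pcs = [] then []
  else
    let sorted_pcs := PySem.List.sorted (PySem.Set.ofList (pcs.map (fun pc => PySem.Int.mod pc 12))) (fun x => x) false
    let rotations := (PySem.List.pyRange 0 12 1).map (fun i => sorted_pcs.map (fun pc => PySem.Int.mod (pc - i) 12))
    let min_span := (PySem.List.min? (rotations.map pySpan) (fun x => x)).getD 0
    let candidates := rotations.filter (fun r => pySpan r == min_span)
    (PySem.List.min? candidates (fun x => x)).getD []

def prime_form (pcs : List Int) : List Int :=
  let nf := normal_form pcs
  let inv := PySem.List.sorted (pcs.map (fun pc => PySem.Int.mod (11 - pc) 12)) (fun x => x) false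
  let inv_nf := normal_form inv
  if pySpan nf ≤ pySpan inv_nf then nf else inv_nf

-- ===== PORT B =====
def prime_form_alt (pcs : List Int) : List Int :=
  if pcs = [] then []
  else
    let s := PySem.List.sorted (PySem.Set.ofList (pcs.map (fun pc => PySem.Int.mod pc 12))) (fun x => x) false
    let nf := s.map (fun p => p - PySem.List.pyGetD s 0 0)
    let t := PySem.List.sorted (PySem.Set.ofList (pcs.map (fun pc => PySem.Int.mod (11 - pc) 12))) (fun x => x) false
    let inv_nf := t.map (fun p => p - PySem.List.pyGetD t 0 0)
    if PySem.List.pyGetD nf (-1) 0 ≤ PySem.List.pyGetD inv_nf (-1) 0 then nf else inv_nf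

-- ===== PRECONDITION & SPEC =====
-- A raises IndexError on the empty list (span indexes rotation[-1] of the empty normal form).
def Pre_prime_form (pcs : List Int) : Prop := pcs ≠ []
instance (pcs : List Int) : Decidable (Pre_prime_form pcs) := by unfold Pre_prime_form; infer_instance
def pvWitness_prime_form : List Int := ([0, 4, 7] : List Int)

def Spec_prime_form (pcs : List Int) (out : List Int) : Prop := out = prime_form_alt pcs
instance (pcs : List Int) (out : List Int) : Decidable (Spec_prime_form pcs out) := by unfold Spec_prime_form; infer_instance

-- ===== CLAIM (what is proved, stated in full; the proofs are below) =====
def Claim_equal_prime_form : Prop := ∀ (pcs : List Int), Dom_prime_form pcs → Pre_prime_form pcs → Spec_prime_form pcs (prime_form pcs)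

-- ===== LEMMAS AND PROOFS =====

-- min? with the identity key, expressed as a running fold over the tail
lemma min?_cons_foldl {α : Type} [LinearOrder α] [DecidableLT α] (x : α) (l : List α) :
    PySem.List.min? (x :: l) (fun y => y) = some (l.foldl (fun b y => if y < b then y else b) x) := by
  simp only [PySem.List.min?, List.foldl_cons]
  induction l generalizing x with
  | nil => rfl
  | cons y l ih =>
    simp only [List.foldl_cons]
    split_ifs <;> exact ih _

lemma foldl_pickmin {α : Type} [LinearOrder α] [DecidableLT α] (m : α) :
    ∀ (l : List α) (b : α), (∀ y ∈ l, y = m ∨ m < y) → (b = m ∨ m < b) → (m ∈ l ∨ b = m) →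
      l.foldl (fun b y => if y < b then y else b) b = m := by
  intro l
  induction l with
  | nil =>
    intro b _ _ hmem
    rcases hmem with h | h
    · exact absurd h (List.not_mem_nil)
    · simpa using h
  | cons y l ih =>
    intro b hall hb hmem
    have hy : y = m ∨ m < y := hall y List.mem_cons_self
    simp only [List.foldl_cons]
    apply ih
    · intro z hz; exact hall z (List.mem_cons_of_mem _ hz)
    · split_ifs with hlt
      · exact hy
      · exact hb
    · rcases hmem with hm | hbm
      · rcases List.mem_cons.mp hm with hym | hml
        · -- y = m: after this step the accumulator is m
          right
          subst hym
          rcases hb with rfl | hlt'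
          · simp
          · simp [hlt']
        · exact Or.inl hml
      · -- b = m
        right
        subst hbm
        rcases hy with rfl | hlt'
        · split_ifs with h <;> rfl
        · have : ¬ y < b := not_lt.mpr (le_of_lt hlt')
          simp [this]

lemma min?_eq_of_unique {α : Type} [LinearOrder α] [DecidableLT α] {l : List α} {m : α}
    (hm : m ∈ l) (h : ∀ y ∈ l, y = m ∨ m < y) :
    PySem.List.min? l (fun y => y) = some m := by
  cases l with
  | nil => exact absurd hm (List.not_mem_nil)
  | cons x l =>
    rw [min?_cons_foldl]
    congr 1
    apply foldl_pickmin
    · intro y hy; exact h y (List.mem_cons_of_mem _ hy)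
    · exact h x List.mem_cons_self
    · rcases List.mem_cons.mp hm with rfl | hml
      · exact Or.inr rfl
      · exact Or.inl hml


-- the sorted distinct pitch-class set that normal_form starts from
def pcSet (xs : List Int) : List Int :=
  PySem.List.sorted (PySem.Set.ofList (xs.map (fun pc => PySem.Int.mod pc 12))) (fun x => x) false

lemma mod12_bounds (x : Int) : 0 ≤ PySem.Int.mod x 12 ∧ PySem.Int.mod x 12 < 12 := by
  rw [PySem.Int.mod_eq_emod_of_pos (by norm_num)]
  exact ⟨Int.emod_nonneg x (by norm_num), Int.emod_lt_of_pos x (by norm_num)⟩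

lemma pcSet_bounds (xs : List Int) : ∀ p ∈ pcSet xs, 0 ≤ p ∧ p < 12 := by
  intro p hp
  rw [pcSet, PySem.List.mem_sorted, PySem.Set.mem_ofList, List.mem_map] at hp
  obtain ⟨pc, _, rfl⟩ := hp
  exact mod12_bounds pc

lemma pcSet_pairwise (xs : List Int) : (pcSet xs).Pairwise (· < ·) :=
  PySem.List.sorted_ofList_pairwise_lt _

lemma pcSet_ne_nil (xs : List Int) (h : xs ≠ []) : pcSet xs ≠ [] := by
  rw [pcSet, Ne, PySem.List.sorted_eq_nil_iff]
  intro hof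
  cases xs with
  | nil => exact h rfl
  | cons x xs' =>
    have hx : PySem.Int.mod x 12 ∈ PySem.Set.ofList (((x :: xs').map (fun pc => PySem.Int.mod pc 12))) := by
      rw [PySem.Set.mem_ofList]
      exact List.mem_map_of_mem List.mem_cons_self
    rw [hof] at hx
    exact absurd hx (List.not_mem_nil)

-- the span of every rotation is the same: last-minus-first of the sorted set
lemma span_rot (a : Int) (tl : List Int) (hh : ∀ p ∈ a :: tl, a ≤ p)
    (hb : ∀ p ∈ a :: tl, 0 ≤ p ∧ p < 12) (i : Int) :
    pySpan ((a :: tl).map (fun p => PySem.Int.mod (p - i) 12))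
      = (if tl = [] then 0 else (a :: tl).getLast (by simp) - a) := by
  unfold pySpan
  cases tl with
  | nil => simp
  | cons b tl' =>
    have hne : ((a :: b :: tl').map (fun p => PySem.Int.mod (p - i) 12)) ≠ [] := by simp
    rw [if_neg (by simp), if_neg (by simp)]
    rw [PySem.List.pyGetD_neg_one _ _ hne, List.getLast_map, PySem.List.pyGetD_zero]
    have hL1 : a ≤ (a :: b :: tl').getLast (by simp) := hh _ (List.getLast_mem _)
    have hL2 : (a :: b :: tl').getLast (by simp) < 12 := (hb _ (List.getLast_mem _)).2
    have ha0 : 0 ≤ a := (hb a List.mem_cons_self).1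
    rw [List.map_cons, List.getD_cons_zero]
    rw [PySem.Int.mod_eq_emod_of_pos (by norm_num), PySem.Int.mod_eq_emod_of_pos (by norm_num),
        PySem.Int.mod_eq_emod_of_pos (by norm_num)]
    calc (((a :: b :: tl').getLast (by simp) - i) % 12 - (a - i) % 12) % 12
        = (((a :: b :: tl').getLast (by simp) - i) - (a - i)) % 12 := by rw [← Int.sub_emod]
      _ = ((a :: b :: tl').getLast (by simp) - a) % 12 := by ring_nf
      _ = (a :: b :: tl').getLast (by simp) - a := Int.emod_eq_of_lt (by omega) (by omega)

lemma normal_form_eq (xs : List Int) (hxs : xs ≠ []) :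
    normal_form xs = (pcSet xs).map (fun p => p - PySem.List.pyGetD (pcSet xs) 0 0) := by
  obtain ⟨a, tl, hs⟩ : ∃ a tl, pcSet xs = a :: tl := by
    cases h : pcSet xs with
    | nil => exact absurd h (pcSet_ne_nil xs hxs)
    | cons a tl => exact ⟨a, tl, rfl⟩
  have hpair := pcSet_pairwise xs
  have hbd := pcSet_bounds xs
  rw [hs] at hpair hbd
  have hh : ∀ p ∈ a :: tl, a ≤ p := by
    intro p hp
    rcases List.mem_cons.mp hp with rfl | hp'
    · exact le_refl p
    · exact le_of_lt ((List.pairwise_cons.mp hpair).1 p hp')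
  have hs' : PySem.List.sorted (PySem.Set.ofList (xs.map (fun pc => PySem.Int.mod pc 12))) (fun x => x) false = a :: tl := by
    rw [← pcSet]; exact hs
  simp only [normal_form]
  rw [if_neg hxs, hs', hs]
  rw [PySem.List.pyGetD_zero_cons]
  set c : Int := if tl = [] then 0 else (a :: tl).getLast (by simp) - a with hc
  have hmap : ((PySem.List.pyRange 0 12 1).map
        (fun i => (a :: tl).map (fun pc => PySem.Int.mod (pc - i) 12))).map pySpan
      = (PySem.List.pyRange 0 12 1).map (fun _ => c) := by
    rw [List.map_map]
    exact List.map_congr_left (fun i _ => span_rot a tl hh hbd i)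
  have h0mem : (0:Int) ∈ PySem.List.pyRange 0 12 1 := by
    rw [PySem.List.mem_pyRange_one]; norm_num
  have hmin1 : PySem.List.min? (((PySem.List.pyRange 0 12 1).map
        (fun i => (a :: tl).map (fun pc => PySem.Int.mod (pc - i) 12))).map pySpan) (fun x => x)
      = some c := by
    rw [hmap]
    refine min?_eq_of_unique (List.mem_map_of_mem h0mem) ?_
    intro y hy
    rcases List.mem_map.mp hy with ⟨i, _, rfl⟩
    exact Or.inl rfl
  rw [hmin1]
  have hfilter : ((PySem.List.pyRange 0 12 1).map
        (fun i => (a :: tl).map (fun pc => PySem.Int.mod (pc - i) 12))).filter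
        (fun r => pySpan r == (some c).getD 0)
      = (PySem.List.pyRange 0 12 1).map (fun i => (a :: tl).map (fun pc => PySem.Int.mod (pc - i) 12)) := by
    apply List.filter_eq_self.mpr
    intro r hr
    rcases List.mem_map.mp hr with ⟨i, _, rfl⟩
    rw [span_rot a tl hh hbd i]
    simp [hc]
  rw [hfilter]
  have hmin2 : PySem.List.min? ((PySem.List.pyRange 0 12 1).map
        (fun i => (a :: tl).map (fun pc => PySem.Int.mod (pc - i) 12))) (fun x => x)
      = some ((a :: tl).map (fun pc => PySem.Int.mod (pc - a) 12)) := by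
    refine min?_eq_of_unique (List.mem_map_of_mem (by
      rw [PySem.List.mem_pyRange_one]
      exact ⟨(hbd a List.mem_cons_self).1, (hbd a List.mem_cons_self).2⟩)) ?_
    intro y hy
    rcases List.mem_map.mp hy with ⟨i, hi, rfl⟩
    by_cases hia : i = a
    · subst hia; exact Or.inl rfl
    · right
      rw [List.map_cons, List.map_cons]
      apply List.cons_lt_cons_iff.mpr
      left
      rw [PySem.Int.mod_eq_emod_of_pos (by norm_num), PySem.Int.mod_eq_emod_of_pos (by norm_num)]
      have h00 : (a - a) % 12 = 0 := by simp
      rw [h00]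
      have h0 : 0 ≤ (a - i) % 12 := Int.emod_nonneg _ (by norm_num)
      have hne0 : (a - i) % 12 ≠ 0 := by
        intro h
        obtain ⟨k, hk⟩ := Int.dvd_of_emod_eq_zero h
        have hi' := PySem.List.mem_pyRange_one.mp hi
        have haa := hbd a List.mem_cons_self
        omega
      omega
  rw [hmin2]
  show ((a :: tl).map (fun pc => PySem.Int.mod (pc - a) 12)) = (a :: tl).map (fun p => p - a)
  apply List.map_congr_left
  intro p hp
  rw [PySem.Int.mod_eq_emod_of_pos (by norm_num)]
  have h1 := hh p hp
  have h2 := hbd p hp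
  have h3 := (hbd a List.mem_cons_self).1
  exact Int.emod_eq_of_lt (by omega) (by omega)

-- normal_form of an already-reduced, sorted list starts from the same pitch-class set
lemma pcSet_sorted (L : List Int) (hbd : ∀ x ∈ L, 0 ≤ x ∧ x < 12) :
    pcSet (PySem.List.sorted L (fun x => x) false)
      = PySem.List.sorted (PySem.Set.ofList L) (fun x => x) false := by
  rw [pcSet]
  have h1 : (PySem.List.sorted L (fun x => x) false).map (fun pc => PySem.Int.mod pc 12)
      = PySem.List.sorted L (fun x => x) false := by
    conv_rhs => rw [← List.map_id (PySem.List.sorted L (fun x => x) false)]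
    apply List.map_congr_left
    intro x hx
    rw [PySem.List.mem_sorted] at hx
    rw [PySem.Int.mod_eq_emod_of_pos (by norm_num)]
    simp only [id]
    exact Int.emod_eq_of_lt (hbd x hx).1 (hbd x hx).2
  rw [h1]
  apply PySem.List.sorted_eq_of_perm_of_pairwise_lt
  · refine (PySem.List.sorted_perm _ _ _).trans ?_
    rw [List.perm_ext_iff_of_nodup (PySem.Set.nodup_ofList _) (PySem.Set.nodup_ofList _)]
    intro x
    rw [PySem.Set.mem_ofList, PySem.Set.mem_ofList, PySem.List.mem_sorted]
  · exact PySem.List.sorted_ofList_pairwise_lt L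

-- A's span of a zero-based normal form is its last element (B's comparison key)
lemma span_eq_last (a : Int) (tl : List Int) (hh : ∀ p ∈ a :: tl, a ≤ p)
    (hb : ∀ p ∈ a :: tl, 0 ≤ p ∧ p < 12) :
    pySpan ((a :: tl).map (fun p => p - a))
      = PySem.List.pyGetD ((a :: tl).map (fun p => p - a)) (-1) 0 := by
  unfold pySpan
  cases tl with
  | nil => simp [PySem.List.pyGetD_neg_one]
  | cons b tl' =>
    have hne : ((a :: b :: tl').map (fun p => p - a)) ≠ [] := by simp
    rw [if_neg (by simp)]
    rw [PySem.List.pyGetD_neg_one _ _ hne, List.getLast_map, PySem.List.pyGetD_zero]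
    rw [List.map_cons, List.getD_cons_zero]
    have hL1 : a ≤ (a :: b :: tl').getLast (by simp) := hh _ (List.getLast_mem _)
    have hL2 : (a :: b :: tl').getLast (by simp) < 12 := (hb _ (List.getLast_mem _)).2
    have ha0 : 0 ≤ a := (hb a List.mem_cons_self).1
    rw [PySem.Int.mod_eq_emod_of_pos (by norm_num)]
    have : ((a :: b :: tl').getLast (by simp) - a - (a - a)) = (a :: b :: tl').getLast (by simp) - a := by ring
    rw [this]
    exact Int.emod_eq_of_lt (by omega) (by omega)

-- helper: head bound from pairwise
lemma head_le_of_pairwise (a : Int) (tl : List Int) (hpair : (a :: tl).Pairwise (· < ·)) :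
    ∀ p ∈ a :: tl, a ≤ p := by
  intro p hp
  rcases List.mem_cons.mp hp with rfl | hp'
  · exact le_refl p
  · exact le_of_lt ((List.pairwise_cons.mp hpair).1 p hp')

-- ===== VERDICT (by name: the statement is the Claim_ definition above) =====
theorem prime_form_spec : Claim_equal_prime_form := by
  intro pcs _ hpre
  unfold Spec_prime_form
  have hxs : pcs ≠ [] := hpre
  have hinv_ne : PySem.List.sorted (pcs.map (fun pc => PySem.Int.mod (11 - pc) 12)) (fun x => x) false ≠ [] := by
    rw [Ne, PySem.List.sorted_eq_nil_iff, List.map_eq_nil_iff]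
    exact hxs
  have hLbd : ∀ x ∈ pcs.map (fun pc => PySem.Int.mod (11 - pc) 12), 0 ≤ x ∧ x < 12 := by
    intro x hx
    rcases List.mem_map.mp hx with ⟨pc, _, rfl⟩
    exact mod12_bounds (11 - pc)
  simp only [prime_form, prime_form_alt]
  rw [if_neg hxs]
  rw [normal_form_eq pcs hxs, normal_form_eq _ hinv_ne, pcSet_sorted _ hLbd]
  -- destructure the two sorted pitch-class sets
  obtain ⟨a, tl, hs⟩ : ∃ a tl, pcSet pcs = a :: tl := by
    cases h : pcSet pcs with
    | nil => exact absurd h (pcSet_ne_nil pcs hxs)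
    | cons a tl => exact ⟨a, tl, rfl⟩
  have ht_ne : PySem.List.sorted (PySem.Set.ofList (pcs.map (fun pc => PySem.Int.mod (11 - pc) 12))) (fun x => x) false ≠ [] := by
    rw [Ne, PySem.List.sorted_eq_nil_iff]
    intro hof
    cases hpc : pcs with
    | nil => exact hxs hpc
    | cons x xs' =>
      have hx : PySem.Int.mod (11 - x) 12 ∈ PySem.Set.ofList (pcs.map (fun pc => PySem.Int.mod (11 - pc) 12)) := by
        rw [PySem.Set.mem_ofList]
        exact List.mem_map_of_mem (by rw [hpc]; exact List.mem_cons_self)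
      rw [hof] at hx
      exact absurd hx (List.not_mem_nil)
  obtain ⟨a', tl', ht⟩ : ∃ a' tl',
      PySem.List.sorted (PySem.Set.ofList (pcs.map (fun pc => PySem.Int.mod (11 - pc) 12))) (fun x => x) false = a' :: tl' := by
    cases h : PySem.List.sorted (PySem.Set.ofList (pcs.map (fun pc => PySem.Int.mod (11 - pc) 12))) (fun x => x) false with
    | nil => exact absurd h ht_ne
    | cons a' tl' => exact ⟨a', tl', rfl⟩
  have hpair1 := pcSet_pairwise pcs
  have hbd1 := pcSet_bounds pcs
  rw [hs] at hpair1 hbd1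
  have hpair2 : (a' :: tl').Pairwise (· < ·) := by
    rw [← ht]; exact PySem.List.sorted_ofList_pairwise_lt _
  have hbd2 : ∀ p ∈ a' :: tl', 0 ≤ p ∧ p < 12 := by
    intro p hp
    rw [← ht, PySem.List.mem_sorted, PySem.Set.mem_ofList] at hp
    exact hLbd p hp
  have hs'' : PySem.List.sorted (PySem.Set.ofList (pcs.map (fun pc => PySem.Int.mod pc 12))) (fun x => x) false = a :: tl := by
    rw [← pcSet]; exact hs
  rw [hs, hs'', ht]
  rw [PySem.List.pyGetD_zero_cons, PySem.List.pyGetD_zero_cons]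
  rw [span_eq_last a tl (head_le_of_pairwise a tl hpair1) hbd1,
      span_eq_last a' tl' (head_le_of_pairwise a' tl' hpair2) hbd2]
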